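-- pv_equiv track=rewrite | github.com/Vivian-Green/sims-bustin-out | custom_tools/semi-auto_splitter.py | get_coverage_intervals
-- ===== SOURCE A (Python) =====
-- from typing import Dict, List, Tuple, Optional
--
-- def get_coverage_intervals(functions: List[Dict]) -> Tuple[List[Tuple[int, int]], int]:
--     """Compute merged intervals (absolute addresses) covered by functions and total covered bytes."""
--     intervals = [(f['addr'], f['addr'] + f['size']) for f in functions]
--     intervals.sort()
--     merged = []
--     for start, end in intervals:
--         if not merged or start > merged[-1][1]:
--             merged.append([start, end])
--         else:
--             merged[-1][1] = max(merged[-1][1], end)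
--     # Convert to tuples
--     merged = [(s, e) for s, e in merged]
--     covered_bytes = sum(e - s for s, e in merged)
--     return merged, covered_bytes
-- ===== SOURCE B (Python) =====
-- def get_coverage_intervals(functions):
--     """Compute merged intervals (absolute addresses) covered by functions and total covered bytes.
--
--     Walks the sorted intervals BACKWARDS keeping a stack of already-merged groups
--     (top of stack = earliest group found so far): each interval pops every group
--     it reaches off the stack, fusing their ends, then is pushed as the new front
--     group.  The result is the stack read top-to-bottom; no mutation of the last
--     list element, no forward extend step.
--     """
--     ivs = sorted((f['addr'], f['addr'] + f['size']) for f in functions)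
--     rev = []  # merged groups in reverse order: rev[-1] is the earliest group so far
--     for s, e in reversed(ivs):
--         while rev and rev[-1][0] <= e:
--             e = max(e, rev.pop()[1])
--         rev.append((s, e))
--     merged = rev[::-1]
--     return merged, sum(e - s for s, e in merged)
-- ===== Notes on version B (the rewrite author's own statement) =====
-- stated objective: alternative
-- what changed: B merges by traversing the sorted intervals backwards with a stack of finished groups, popping and fusing every group the current interval reaches and pushing it as the new front group, then reverses the stack; A scans forward growing a list of mutable [start,end] pairs by rewriting the last element's end. Same O(n log n) cost, opposite traversal direction and data structure (pop-fuse stack vs extend-last list).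
import Mathlib
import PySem

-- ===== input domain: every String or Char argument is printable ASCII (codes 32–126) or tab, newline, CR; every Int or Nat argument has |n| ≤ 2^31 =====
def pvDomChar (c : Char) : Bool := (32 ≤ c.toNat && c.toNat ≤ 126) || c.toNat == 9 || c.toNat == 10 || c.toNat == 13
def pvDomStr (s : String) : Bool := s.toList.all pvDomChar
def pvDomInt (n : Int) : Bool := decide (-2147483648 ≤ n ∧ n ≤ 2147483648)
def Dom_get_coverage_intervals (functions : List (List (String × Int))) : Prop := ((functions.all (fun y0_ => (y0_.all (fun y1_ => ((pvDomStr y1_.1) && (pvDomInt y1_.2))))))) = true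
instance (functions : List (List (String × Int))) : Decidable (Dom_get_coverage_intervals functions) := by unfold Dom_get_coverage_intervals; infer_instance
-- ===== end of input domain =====

-- B merges the sorted intervals by a backward traversal with a stack of finished groups
-- (pop-and-fuse every group the current interval reaches, push it as the new front group,
-- reverse the stack at the end) instead of A's forward scan that rewrites the last
-- element's end; equal return value, no side effects.

-- shared helper: f['addr'] / f['size'] (value 0 only read when Pre_ fails, i.e. Python raised KeyError)
def fval (f : List (String × Int)) (k : String) : Int :=
  ((PySem.Dict.ofList f).get? k).getD 0

-- ===== PORT A =====
-- A's loop body: append a new [start, end] or mutate merged[-1][1]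
def aStep (merged : List (Int × Int)) (se : Int × Int) : List (Int × Int) :=
  match merged.getLast? with
  | none => merged ++ [(se.1, se.2)]
  | some last =>
    if se.1 > last.2 then merged ++ [(se.1, se.2)]
    else merged.dropLast ++ [(last.1, max last.2 se.2)]

-- A's final pass: sum(e - s for s, e in merged)
def sumBytes (l : List (Int × Int)) : Int :=
  l.foldl (fun acc p => acc + (p.2 - p.1)) 0

def get_coverage_intervals (functions : List (List (String × Int))) : (List (Int × Int)) × Int :=
  let intervals := functions.map (fun f => (fval f "addr", fval f "addr" + fval f "size"))
  let intervals := PySem.List.sorted2 intervals (fun p => p.1) (fun p => p.2) false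
  let merged := intervals.foldl aStep []
  (merged, sumBytes merged)

-- ===== PORT B =====
-- B's inner while loop: pop groups off the stack while rev[-1][0] <= e, fusing their ends
def bAbsorb (rev : List (Int × Int)) (e : Int) : (List (Int × Int)) × Int :=
  match h : rev.getLast? with
  | none => (rev, e)
  | some top =>
    if top.1 ≤ e then bAbsorb rev.dropLast (max e top.2) else (rev, e)
termination_by rev.length
decreasing_by
  have hne : rev ≠ [] := by intro hn; subst hn; simp at h
  have : 0 < rev.length := List.length_pos_iff.mpr hne
  simp [List.length_dropLast]; omega

-- B's outer loop body: absorb the interval, then push it on the stack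
def bStep (rev : List (Int × Int)) (se : Int × Int) : List (Int × Int) :=
  let r := bAbsorb rev se.2
  r.1 ++ [(se.1, r.2)]

def get_coverage_intervals_alt (functions : List (List (String × Int))) : (List (Int × Int)) × Int :=
  let ivs := PySem.List.sorted2
      (functions.map (fun f => (fval f "addr", fval f "addr" + fval f "size")))
      (fun p => p.1) (fun p => p.2) false
  let merged := (ivs.reverse.foldl bStep []).reverse
  (merged, merged.foldl (fun acc p => acc + (p.2 - p.1)) 0)

-- ===== PRECONDITION & SPEC =====
-- Pre_ excludes exactly the inputs where Python A raises KeyError: some function dict lacks 'addr' or 'size'.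
def Pre_get_coverage_intervals (functions : List (List (String × Int))) : Prop :=
  (functions.all (fun f => (PySem.Dict.ofList f).contains "addr" && (PySem.Dict.ofList f).contains "size")) = true

instance (functions : List (List (String × Int))) : Decidable (Pre_get_coverage_intervals functions) := by
  unfold Pre_get_coverage_intervals; infer_instance

def pvWitness_get_coverage_intervals : (List (List (String × Int))) :=
  [[("addr", 10), ("size", 4)], [("addr", 12), ("size", 3)], [("addr", 20), ("size", 0)]]

def Spec_get_coverage_intervals (functions : List (List (String × Int))) (out : (List (Int × Int)) × Int) : Prop := out = get_coverage_intervals_alt functions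
instance (functions : List (List (String × Int))) (out : (List (Int × Int)) × Int) : Decidable (Spec_get_coverage_intervals functions out) := by unfold Spec_get_coverage_intervals; infer_instance

-- ===== CLAIM (what is proved, stated in full; the proofs are below) =====
def Claim_equal_get_coverage_intervals : Prop := ∀ (functions : List (List (String × Int))), Dom_get_coverage_intervals functions → Pre_get_coverage_intervals functions → Spec_get_coverage_intervals functions (get_coverage_intervals functions)

-- ===== LEMMAS AND PROOFS =====

-- proof-only middle form: a right-recursive merge both loops are shown equal to
def absorb : Int × Int → List (Int × Int) → List (Int × Int)
  | c, [] => [c]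
  | c, g :: gs => if g.1 ≤ c.2 then absorb (c.1, max c.2 g.2) gs else c :: g :: gs

def mergeRec : List (Int × Int) → List (Int × Int)
  | [] => []
  | x :: xs => absorb x (mergeRec xs)

lemma absorb_head (G : List (Int × Int)) : ∀ c, ∃ e gs, absorb c G = (c.1, e) :: gs := by
  induction G with
  | nil => intro c; exact ⟨c.2, [], rfl⟩
  | cons g gs ih =>
    intro c
    by_cases h : g.1 ≤ c.2
    · obtain ⟨e, l, hl⟩ := ih (c.1, max c.2 g.2)
      exact ⟨e, l, by simpa [absorb, h] using hl⟩
    · exact ⟨c.2, g :: gs, by simp [absorb, h]⟩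

lemma absorb_absorb (G : List (Int × Int)) : ∀ c y : Int × Int, y.1 ≤ c.2 →
    absorb c (absorb y G) = absorb (c.1, max c.2 y.2) G := by
  induction G with
  | nil => intro c y h; simp [absorb, h]
  | cons g gs ih =>
    intro c y h
    by_cases hg : g.1 ≤ y.2
    · have hg' : g.1 ≤ max c.2 y.2 := le_trans hg (le_max_right _ _)
      have := ih c (y.1, max y.2 g.2) (by simpa using h)
      simp only [absorb, if_pos hg, if_pos hg'] at *
      rw [this]
      congr 2
      omega
    · by_cases hgc : g.1 ≤ c.2
      · simp [absorb, hg, h, hgc]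
      · have : ¬ g.1 ≤ max c.2 y.2 := by omega
        simp [absorb, hg, h, this]

-- A's fold never touches the prefix before the last element
lemma foldl_aStep_append (xs : List (Int × Int)) : ∀ (out : List (Int × Int)) (cur : Int × Int),
    xs.foldl aStep (out ++ [cur]) = out ++ xs.foldl aStep [cur] := by
  induction xs with
  | nil => intro out cur; simp
  | cons x xs ih =>
    intro out cur
    by_cases h : x.1 > cur.2
    · have h1 : aStep (out ++ [cur]) x = (out ++ [cur]) ++ [(x.1, x.2)] := by
        simp [aStep, h]
      have h2 : aStep [cur] x = [cur] ++ [(x.1, x.2)] := by simp [aStep, h]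
      simp only [List.foldl_cons, h1, h2, ih]
      simp
    · have h1 : aStep (out ++ [cur]) x = out ++ [(cur.1, max cur.2 x.2)] := by
        simp [aStep, h]
      have h2 : aStep [cur] x = [] ++ [(cur.1, max cur.2 x.2)] := by simp [aStep, h]
      simp only [List.foldl_cons, h1, h2, ih]
      simp

lemma foldl_aStep_mergeRec (xs : List (Int × Int)) : ∀ cur : Int × Int,
    xs.foldl aStep [cur] = absorb cur (mergeRec xs) := by
  induction xs with
  | nil => intro cur; simp [mergeRec, absorb]
  | cons x xs ih =>
    intro cur
    by_cases h : x.1 > cur.2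
    · have h1 : aStep [cur] x = [cur] ++ [(x.1, x.2)] := by simp [aStep, h]
      obtain ⟨e, gs, hg⟩ := absorb_head (mergeRec xs) x
      have hx : absorb (x.1, x.2) (mergeRec xs) = absorb x (mergeRec xs) := by rfl
      calc (x :: xs).foldl aStep [cur]
          = xs.foldl aStep ([cur] ++ [(x.1, x.2)]) := by rw [List.foldl_cons, h1]
        _ = [cur] ++ xs.foldl aStep [(x.1, x.2)] := foldl_aStep_append xs [cur] (x.1, x.2)
        _ = [cur] ++ absorb x (mergeRec xs) := by rw [ih (x.1, x.2), hx]
        _ = absorb cur (absorb x (mergeRec xs)) := by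
              rw [hg]; simp [absorb, show ¬ x.1 ≤ cur.2 by omega]
        _ = absorb cur (mergeRec (x :: xs)) := by rfl
    · have h1 : aStep [cur] x = [(cur.1, max cur.2 x.2)] := by simp [aStep, h]
      calc (x :: xs).foldl aStep [cur]
          = xs.foldl aStep [(cur.1, max cur.2 x.2)] := by rw [List.foldl_cons, h1]
        _ = absorb (cur.1, max cur.2 x.2) (mergeRec xs) := ih _
        _ = absorb cur (absorb x (mergeRec xs)) := by
              rw [absorb_absorb (mergeRec xs) cur x (by omega)]
        _ = absorb cur (mergeRec (x :: xs)) := by rfl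

lemma foldl_aStep_eq_mergeRec (xs : List (Int × Int)) :
    xs.foldl aStep [] = mergeRec xs := by
  cases xs with
  | nil => rfl
  | cons x xs =>
    have h1 : aStep [] x = [(x.1, x.2)] := by simp [aStep]
    rw [List.foldl_cons, h1, foldl_aStep_mergeRec]
    rfl

-- B's while loop mirrors absorb through list reversal
lemma bAbsorb_reverse (rev : List (Int × Int)) : ∀ s e : Int,
    ((bAbsorb rev e).1 ++ [(s, (bAbsorb rev e).2)]).reverse = absorb (s, e) rev.reverse := by
  induction rev using List.reverseRecOn with
  | nil => intro s e; simp [bAbsorb, absorb]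
  | append_singleton ys y ih =>
    intro s e
    have hlast : (ys ++ [y]).getLast? = some y := by simp
    by_cases h : y.1 ≤ e
    · have hb : bAbsorb (ys ++ [y]) e = bAbsorb ys (max e y.2) := by
        rw [bAbsorb, hlast]; simp [h]
      rw [hb, ih s (max e y.2)]
      simp [absorb, h]
    · have hb : bAbsorb (ys ++ [y]) e = (ys ++ [y], e) := by
        rw [bAbsorb, hlast]; simp [h]
      rw [hb]
      simp [absorb, h]

lemma foldl_bStep_eq_mergeRec (xs : List (Int × Int)) :
    (xs.reverse.foldl bStep []).reverse = mergeRec xs := by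
  induction xs with
  | nil => rfl
  | cons x xs ih =>
    have : (x :: xs).reverse = xs.reverse ++ [x] := by simp
    rw [this, List.foldl_append, List.foldl_cons, List.foldl_nil]
    show (bStep (xs.reverse.foldl bStep []) x).reverse = absorb x (mergeRec xs)
    rw [bStep, ← ih]
    exact bAbsorb_reverse (xs.reverse.foldl bStep []) x.1 x.2

-- ===== VERDICT (by name: the statement is the Claim_ definition above) =====
theorem get_coverage_intervals_spec : Claim_equal_get_coverage_intervals := by
  intro functions _ _
  show get_coverage_intervals functions = get_coverage_intervals_alt functions
  unfold get_coverage_intervals get_coverage_intervals_alt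
  dsimp only
  rw [foldl_aStep_eq_mergeRec, foldl_bStep_eq_mergeRec]
  rfl
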